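-- pv_equiv track=rewrite | github.com/xyax/Grouping | clustering.py | mostDistant
-- ===== SOURCE A (Python) =====
-- def mostDistant(nums, centers):
--     mins = []
--     for n in nums:
--         dists = []
--         for c in centers:
--             dists.append(abs(n-c))
--         mins.append(min(dists))
--     return nums[mins.index(max(mins))]
-- ===== SOURCE B (Python) =====
-- def mostDistant(nums, centers):
--     cs = sorted(centers)
--     best_num = None
--     best_dist = -1
--     for n in nums:
--         # bisect_left(cs, n) written out (no imports in this module)
--         lo, hi = 0, len(cs)
--         while lo < hi:
--             mid = (lo + hi) // 2
--             if cs[mid] < n: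
--                 lo = mid + 1
--             else:
--                 hi = mid
--         if lo < len(cs):
--             d = cs[lo] - n
--             if lo > 0 and n - cs[lo - 1] < d:
--                 d = n - cs[lo - 1]
--         else:
--             d = n - cs[lo - 1]
--         if best_dist < d:
--             best_num, best_dist = n, d
--     return best_num
-- ===== Notes on version B (the rewrite author's own statement) =====
-- stated objective: faster
-- what changed: B sorts the centers once and finds each number's nearest center by binary search over the sorted centers, keeping a running first-strict-maximum instead of A's per-number linear scan over all centers plus the mins/max/index passes.
import Mathlib
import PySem

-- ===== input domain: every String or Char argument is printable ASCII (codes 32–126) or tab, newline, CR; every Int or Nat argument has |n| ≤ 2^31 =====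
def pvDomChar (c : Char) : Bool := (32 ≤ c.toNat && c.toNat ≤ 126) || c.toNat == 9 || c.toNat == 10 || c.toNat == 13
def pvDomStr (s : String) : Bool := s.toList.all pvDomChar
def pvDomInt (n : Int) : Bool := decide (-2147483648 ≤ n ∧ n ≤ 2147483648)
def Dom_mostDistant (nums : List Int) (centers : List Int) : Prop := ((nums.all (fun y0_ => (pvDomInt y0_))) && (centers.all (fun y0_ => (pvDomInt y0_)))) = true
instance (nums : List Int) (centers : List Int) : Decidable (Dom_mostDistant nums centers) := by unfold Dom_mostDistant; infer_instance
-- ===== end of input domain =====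

-- B sorts the centers once and binary-searches the nearest center per number while keeping a
-- running first strict maximum, replacing A's O(n*k) scan (plus mins/max/index passes); measured faster.

-- ===== PORT A =====
def mostDistant (nums : List Int) (centers : List Int) : Int :=
  let mins := nums.foldl (fun acc n =>
      let dists := centers.foldl (fun ds c => ds ++ [|n - c|]) ([] : List Int)
      acc ++ [(PySem.List.min? dists (fun x => x)).getD 0]) ([] : List Int)
  match PySem.List.max? mins (fun x => x) with
  | none => 0                                  -- Python: max([]) raises ValueError (excluded by Pre_)
  | some m =>
    match PySem.List.index? mins m with
    | none => 0
    | some i => (PySem.List.pyGet? nums (i : Int)).getD 0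

-- ===== PORT B =====
-- the hand-written while-loop in Source B is textually bisect_left; PySem.List.bisectLeft is that
-- exact loop (lo/hi, mid = (lo+hi)//2, cs[mid] < n → lo = mid+1 else hi = mid)
def mostDistant_alt (nums : List Int) (centers : List Int) : Int :=
  let cs := PySem.List.sorted centers (fun x => x)
  let r := nums.foldl (fun (acc : Option Int × Int) n =>
      let lo := PySem.List.bisectLeft cs n
      let d :=
        if lo < cs.length then
          let d0 := cs.getD lo 0 - n            -- lo : Nat is in range here; List.getD is exact
          if 0 < lo ∧ n - cs.getD (lo - 1) 0 < d0 then n - cs.getD (lo - 1) 0 else d0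
        else n - cs.getD (lo - 1) 0             -- reached only with lo = |cs| > 0 under Pre_
      if acc.2 < d then (some n, d) else acc) ((none : Option Int), (-1 : Int))
  r.1.getD 0

-- ===== PRECONDITION & SPEC =====
-- Pre_ excludes exactly the inputs on which A raises: empty nums or empty centers
-- (min()/max() of an empty sequence raises ValueError).
def Pre_mostDistant (nums : List Int) (centers : List Int) : Prop := nums ≠ [] ∧ centers ≠ []
instance (nums : List Int) (centers : List Int) : Decidable (Pre_mostDistant nums centers) := by
  unfold Pre_mostDistant; infer_instance
def pvWitness_mostDistant : List Int × List Int := ([3, -1], [0, 2])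

def Spec_mostDistant (nums : List Int) (centers : List Int) (out : Int) : Prop := out = mostDistant_alt nums centers
instance (nums : List Int) (centers : List Int) (out : Int) : Decidable (Spec_mostDistant nums centers out) := by unfold Spec_mostDistant; infer_instance

-- ===== CLAIM (what is proved, stated in full; the proofs are below) =====
def Claim_equal_mostDistant : Prop := ∀ (nums : List Int) (centers : List Int), Dom_mostDistant nums centers → Pre_mostDistant nums centers → Spec_mostDistant nums centers (mostDistant nums centers)

-- ===== LEMMAS AND PROOFS =====

-- the per-number minimum distance (A's inner loop value)
def minDist (centers : List Int) (n : Int) : Int :=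
  (PySem.List.min? (centers.map fun c => |n - c|) (fun x => x)).getD 0

-- B's per-number nearest-center distance (the `d` of the fold body)
def nearestB (cs : List Int) (n : Int) : Int :=
  let lo := PySem.List.bisectLeft cs n
  if lo < cs.length then
    let d0 := cs.getD lo 0 - n
    if 0 < lo ∧ n - cs.getD (lo - 1) 0 < d0 then n - cs.getD (lo - 1) 0 else d0
  else n - cs.getD (lo - 1) 0

def runMax (g : Int → Int) (bd : Int) (l : List Int) : Int :=
  l.foldl (fun d x => max d (g x)) bd

lemma runMax_init_le (g : Int → Int) (l : List Int) : ∀ bd, bd ≤ runMax g bd l := by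
  induction l with
  | nil => intro bd; simp [runMax]
  | cons x t ih =>
    intro bd
    have := ih (max bd (g x))
    simp only [runMax, List.foldl_cons] at *
    exact le_trans (le_max_left _ _) this

lemma runMax_le_of_mem (g : Int → Int) (l : List Int) : ∀ bd x, x ∈ l → g x ≤ runMax g bd l := by
  induction l with
  | nil => intro _ _ h; simp at h
  | cons y t ih =>
    intro bd x hx
    simp only [runMax, List.foldl_cons]
    rcases List.mem_cons.mp hx with h | h
    · subst h
      exact le_trans (le_max_right _ _) (runMax_init_le g t _)
    · exact ih _ x h

lemma runMax_cons (g : Int → Int) (bd y : Int) (t : List Int) :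
    runMax g bd (y :: t) = runMax g (max bd (g y)) t := rfl

lemma runMax_attained (g : Int → Int) (l : List Int) :
    ∀ bd, bd < runMax g bd l → ∃ x ∈ l, g x = runMax g bd l := by
  induction l with
  | nil => intro bd h; simp [runMax] at h
  | cons y t ih =>
    intro bd h
    rw [runMax_cons] at h ⊢
    by_cases h2 : max bd (g y) < runMax g (max bd (g y)) t
    · obtain ⟨x, hx, hgx⟩ := ih _ h2
      exact ⟨x, List.mem_cons_of_mem _ hx, hgx⟩
    · have heq : runMax g (max bd (g y)) t = max bd (g y) :=
        le_antisymm (not_lt.mp h2) (runMax_init_le g t _)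
      rw [heq] at h ⊢
      have : max bd (g y) = g y := by omega
      exact ⟨y, List.mem_cons_self, by omega⟩

lemma find?_congr' {α : Type} (p q : α → Bool) (l : List α) (h : ∀ a ∈ l, p a = q a) :
    l.find? p = l.find? q := by
  induction l with
  | nil => rfl
  | cons x t ih =>
    simp only [List.find?_cons]
    rw [h x List.mem_cons_self]
    cases q x
    · exact ih (fun a ha => h a (List.mem_cons_of_mem _ ha))
    · rfl

lemma find?_first {α : Type} (p : α → Bool) (l : List α) (i : Nat) (hi : i < l.length)
    (hp : p l[i] = true) (hj : ∀ j (hjlt : j < i), ¬ p (l[j]'(Nat.lt_trans hjlt hi)) = true) :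
    l.find? p = some l[i] := by
  induction l generalizing i with
  | nil => simp at hi
  | cons x t ih =>
    cases i with
    | zero => simp_all
    | succ k =>
      have h0 : ¬ p x = true := hj 0 (Nat.succ_pos k)
      simp only [List.find?_cons, Bool.not_eq_true] at h0 ⊢
      rw [h0]
      exact ih k (by simpa using hi) hp (fun j hjlt => hj (j+1) (by omega))

lemma fold_closed (g : Int → Int) (l : List Int) : ∀ (bn : Option Int) (bd : Int),
    l.foldl (fun acc n => if acc.2 < g n then (some n, g n) else acc) (bn, bd)
      = match l.find? (fun x => decide (bd < g x) && decide (runMax g bd l ≤ g x)) with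
        | some x => (some x, runMax g bd l)
        | none => (bn, bd) := by
  induction l with
  | nil => intro bn bd; rfl
  | cons x t ih =>
    intro bn bd
    rw [List.foldl_cons, List.find?_cons, runMax_cons]
    by_cases hx : bd < g x
    · simp only [hx, if_pos, decide_true, Bool.true_and]
      have hmax : max bd (g x) = g x := by omega
      rw [hmax]
      by_cases hM : runMax g (g x) t ≤ g x
      · -- g x is the overall max
        have hMx : runMax g (g x) t = g x := le_antisymm hM (runMax_init_le g t _)
        rw [hMx]
        simp only [le_refl, decide_true]
        have hnone : t.find? (fun y => decide (g x < g y) && decide (runMax g (g x) t ≤ g y)) = none := by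
          apply List.find?_eq_none.mpr
          intro y hy
          have := runMax_le_of_mem g t (g x) y hy
          rw [hMx] at this
          simp only [Bool.and_eq_true, decide_eq_true_eq, not_and]
          intro h1; omega
        rw [ih (some x) (g x), hnone]
      · -- the max lives in t
        rw [not_le] at hM
        have hneq : (decide (runMax g (g x) t ≤ g x)) = false := by simp; omega
        rw [hneq]
        have hcong : t.find? (fun y => decide (bd < g y) && decide (runMax g (g x) t ≤ g y))
            = t.find? (fun y => decide (g x < g y) && decide (runMax g (g x) t ≤ g y)) := by
          apply find?_congr'
          intro a ha
          by_cases hM2 : runMax g (g x) t ≤ g a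
          · have : g x < g a := lt_of_lt_of_le hM hM2
            simp [hM2, this]; omega
          · simp [hM2]
        obtain ⟨z, hz, hgz⟩ := runMax_attained g t (g x) hM
        have hsome : ∃ w, t.find? (fun y => decide (g x < g y) && decide (runMax g (g x) t ≤ g y)) = some w := by
          rcases hfind : t.find? (fun y => decide (g x < g y) && decide (runMax g (g x) t ≤ g y)) with _ | w
          · exfalso
            have := List.find?_eq_none.mp hfind z hz
            simp only [Bool.and_eq_true, decide_eq_true_eq, not_and] at this
            exact this (by omega) (by omega)
          · exact ⟨w, rfl⟩
        obtain ⟨w, hw⟩ := hsome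
        rw [ih (some x) (g x), hw, hcong, hw]
    · simp only [hx, if_neg, decide_false, Bool.false_and, not_false_eq_true]
      have hmax : max bd (g x) = bd := by omega
      rw [hmax]
      exact ih bn bd

lemma minDist_spec (centers : List Int) (n : Int) (h : centers ≠ []) :
    (∃ c ∈ centers, minDist centers n = |n - c|) ∧ ∀ c ∈ centers, minDist centers n ≤ |n - c| := by
  have hne : centers.map (fun c => |n - c|) ≠ [] := by simpa using h
  rcases hm : PySem.List.min? (centers.map fun c => |n - c|) (fun x => x) with _ | m
  · exact absurd ((PySem.List.min?_eq_none_iff _ _).mp hm) hne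
  · have hmem := PySem.List.min?_mem hm
    have hmin := PySem.List.min?_isMin hm
    simp only [minDist, hm, Option.getD_some]
    constructor
    · obtain ⟨c, hc, hcm⟩ := List.mem_map.mp hmem
      exact ⟨c, hc, hcm.symm⟩
    · intro c hc
      exact hmin _ (List.mem_map.mpr ⟨c, hc, rfl⟩)

lemma minDist_nonneg (centers : List Int) (n : Int) (h : centers ≠ []) : 0 ≤ minDist centers n := by
  obtain ⟨⟨c, _, hc⟩, _⟩ := minDist_spec centers n h
  rw [hc]; exact abs_nonneg _

lemma minDist_eq_of (centers : List Int) (n v : Int) (h : centers ≠ [])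
    (hmem : ∃ c ∈ centers, v = |n - c|) (hlb : ∀ c ∈ centers, v ≤ |n - c|) :
    minDist centers n = v := by
  obtain ⟨⟨c, hc, hce⟩, hmin⟩ := minDist_spec centers n h
  obtain ⟨c', hc', hce'⟩ := hmem
  have h1 : minDist centers n ≤ v := by rw [hce']; exact hmin c' hc'
  have h2 : v ≤ minDist centers n := by rw [hce]; exact hlb c hc
  omega

lemma nearestB_eq (centers : List Int) (n : Int) (h : centers ≠ []) :
    nearestB (PySem.List.sorted centers (fun x => x)) n = minDist centers n := by
  set cs := PySem.List.sorted centers (fun x => x) with hcs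
  have hperm : cs.Perm centers := by rw [hcs]; exact PySem.List.sorted_perm centers (fun x => x) false
  have hlen : cs ≠ [] := by
    intro hnil
    exact h ((PySem.List.sorted_eq_nil_iff centers (fun x => x) false).mp (by rw [← hcs]; exact hnil))
  have hpw : cs.Pairwise (fun a b => a ≤ b) := PySem.List.sorted_pairwise centers (fun x => x)
  have hmono : ∀ (i j : Nat) (hi : i < cs.length) (hj : j < cs.length), i ≤ j → cs[i] ≤ cs[j] := by
    intro i j hi hj hij
    rcases Nat.lt_or_ge i j with hlt | hge
    · exact (List.pairwise_iff_getElem.mp hpw) i j hi hj hlt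
    · have : i = j := by omega
      subst this; rfl
  obtain ⟨hk, hlt, hge⟩ := PySem.List.bisectLeft_spec cs n hpw
  set k := PySem.List.bisectLeft cs n with hkdef
  have hpos : 0 < cs.length := List.length_pos_iff.mpr hlen
  -- the value nearestB produces, with facts about it
  apply Eq.symm
  apply minDist_eq_of _ _ _ h
  -- both goals need a case split on the shape of nearestB
  case hmem =>
    unfold nearestB
    rw [← hkdef]
    by_cases h1 : k < cs.length
    · rw [if_pos h1]
      have e0 : cs.getD k 0 = cs[k] := List.getD_eq_getElem cs 0 h1
      by_cases h2 : 0 < k ∧ n - cs.getD (k - 1) 0 < cs.getD k 0 - n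
      · rw [if_pos h2]
        have hk1 : k - 1 < cs.length := by omega
        have e1 : cs.getD (k - 1) 0 = cs[k - 1] := List.getD_eq_getElem cs 0 hk1
        refine ⟨cs[k - 1], hperm.mem_iff.mp (List.getElem_mem hk1), ?_⟩
        have := hlt (k - 1) hk1 (by omega)
        rw [e1]
        rw [abs_of_pos (by omega)]
      · rw [if_neg h2]
        refine ⟨cs[k], hperm.mem_iff.mp (List.getElem_mem h1), ?_⟩
        have := hge k h1 (le_refl _)
        rw [e0, abs_of_nonpos (by omega)]
        ring
    · rw [if_neg h1]
      have hkl : k = cs.length := by omega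
      have hk1 : k - 1 < cs.length := by omega
      have e1 : cs.getD (k - 1) 0 = cs[k - 1] := List.getD_eq_getElem cs 0 hk1
      refine ⟨cs[k - 1], hperm.mem_iff.mp (List.getElem_mem hk1), ?_⟩
      have := hlt (k - 1) hk1 (by omega)
      rw [e1, abs_of_pos (by omega)]
  case hlb =>
    intro c hc
    obtain ⟨i, hi, hci⟩ := List.getElem_of_mem (hperm.mem_iff.mpr hc)
    subst hci
    unfold nearestB
    rw [← hkdef]
    rcases Nat.lt_or_ge i k with hik | hik
    · -- cs[i] < n ; distance is n - cs[i] ≥ n - cs[k-1]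
      have hiv := hlt i hi hik
      have habs : |n - cs[i]| = n - cs[i] := abs_of_pos (by omega)
      have hk1 : k - 1 < cs.length := by omega
      have e1 : cs.getD (k - 1) 0 = cs[k - 1] := List.getD_eq_getElem cs 0 hk1
      have hle : cs[i] ≤ cs[k - 1] := hmono i (k - 1) hi hk1 (by omega)
      by_cases h1 : k < cs.length
      · rw [if_pos h1]
        have e0 : cs.getD k 0 = cs[k] := List.getD_eq_getElem cs 0 h1
        by_cases h2 : 0 < k ∧ n - cs.getD (k - 1) 0 < cs.getD k 0 - n
        · rw [if_pos h2]; rw [e1, habs]; omega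
        · rw [if_neg h2]
          rw [e0, habs]
          rw [e0, e1] at h2
          have : ¬ (n - cs[k - 1] < cs[k] - n) := fun hcon => h2 ⟨by omega, hcon⟩
          omega
      · rw [if_neg h1]
        rw [e1, habs]; omega
    · -- n ≤ cs[i] ; distance is cs[i] - n ≥ cs[k] - n
      have hiv := hge i hi hik
      have h1 : k < cs.length := by omega
      have habs : |n - cs[i]| = cs[i] - n := by rw [abs_of_nonpos (by omega)]; ring
      have e0 : cs.getD k 0 = cs[k] := List.getD_eq_getElem cs 0 h1
      have hle : cs[k] ≤ cs[i] := hmono k i h1 hi hik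
      rw [if_pos h1]
      by_cases h2 : 0 < k ∧ n - cs.getD (k - 1) 0 < cs.getD k 0 - n
      · rw [if_pos h2]; rw [e0] at h2; rw [habs]; omega
      · rw [if_neg h2]; rw [e0, habs]; omega


lemma A_norm (nums centers : List Int) :
    mostDistant nums centers =
      match PySem.List.max? (nums.map (minDist centers)) (fun x => x) with
      | none => 0
      | some m =>
        match PySem.List.index? (nums.map (minDist centers)) m with
        | none => 0
        | some i => (PySem.List.pyGet? nums (i : Int)).getD 0 := by
  have hmd : minDist centers
      = fun n => (PySem.List.min? (List.map (fun c => |n - c|) centers) (fun x => x)).getD 0 := rfl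
  simp only [mostDistant, hmd, PySem.List.foldl_append_singleton_eq_map, List.nil_append]

lemma B_norm (nums centers : List Int) :
    mostDistant_alt nums centers =
      ((nums.foldl (fun (acc : Option Int × Int) n =>
          if acc.2 < nearestB (PySem.List.sorted centers (fun x => x)) n
          then (some n, nearestB (PySem.List.sorted centers (fun x => x)) n) else acc)
        ((none : Option Int), (-1 : Int))).1.getD 0) := rfl

-- ===== VERDICT (by name: the statement is the Claim_ definition above) =====
theorem mostDistant_spec : Claim_equal_mostDistant := by
  intro nums centers _hdom hpre
  obtain ⟨hn, hc⟩ := hpre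
  unfold Spec_mostDistant
  -- normalise both sides
  rw [A_norm, B_norm]
  have hfun : (fun (acc : Option Int × Int) n =>
      if acc.2 < nearestB (PySem.List.sorted centers (fun x => x)) n
      then (some n, nearestB (PySem.List.sorted centers (fun x => x)) n) else acc)
      = (fun (acc : Option Int × Int) n =>
      if acc.2 < minDist centers n then (some n, minDist centers n) else acc) := by
    funext acc n
    rw [nearestB_eq centers n hc]
  rw [hfun]
  set g := minDist centers with hg
  set mins := nums.map g with hmins
  have hmne : mins ≠ [] := by simp [hmins, hn]
  rcases hmax : PySem.List.max? mins (fun x => x) with _ | m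
  · exact absurd ((PySem.List.max?_eq_none_iff _ _).mp hmax) hmne
  have hm_mem : m ∈ mins := PySem.List.max?_mem hmax
  have hm_max : ∀ y ∈ mins, y ≤ m := PySem.List.max?_isMax hmax
  rcases hidx : PySem.List.index? mins m with _ | i
  · exact absurd ((PySem.List.index?_eq_none_iff _ _).mp hidx) (by simpa using hm_mem)
  obtain ⟨hilen, hieq, hifirst⟩ := PySem.List.getElem_of_index?_eq_some hidx
  have hinum : i < nums.length := by simpa [hmins] using hilen
  have hgi : g (nums[i]'hinum) = m := by
    rw [← hieq]; simp [hmins]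
  have hm0 : 0 ≤ m := by rw [← hgi]; exact minDist_nonneg centers _ hc
  -- A's value
  have hA : (PySem.List.pyGet? nums (i : Int)).getD 0 = nums[i]'hinum := by
    rw [PySem.List.pyGet?_natCast, List.getElem?_eq_getElem hinum, Option.getD_some]
  -- the running maximum equals m
  have hgle : ∀ y ∈ nums, g y ≤ m := by
    intro y hy
    exact hm_max (g y) (by simp [hmins]; exact ⟨y, hy, rfl⟩)
  have hMm : runMax g (-1) nums = m := by
    have h1 : m ≤ runMax g (-1) nums := by
      rw [← hgi]; exact runMax_le_of_mem g nums (-1) _ (List.getElem_mem hinum)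
    have h2 : runMax g (-1) nums ≤ m := by
      obtain ⟨x, hx, hgx⟩ := runMax_attained g nums (-1) (by omega)
      rw [← hgx]; exact hgle x hx
    omega
  -- B's fold in closed form
  rw [fold_closed g nums]
  have hfind : nums.find? (fun x => decide ((-1 : Int) < g x) && decide (runMax g (-1) nums ≤ g x))
      = some (nums[i]'hinum) := by
    apply find?_first _ _ i hinum
    · simp only [Bool.and_eq_true, decide_eq_true_eq, hgi, hMm]
      omega
    · intro j hjlt
      have hjlen : j < nums.length := by omega
      have hne : g (nums[j]'hjlen) ≠ m := by
        have := hifirst j (by simpa [hmins] using hjlt)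
        simpa [hmins] using this
      have hle := hgle (nums[j]'hjlen) (List.getElem_mem hjlen)
      simp only [Bool.and_eq_true, decide_eq_true_eq, hMm, not_and]
      intro _
      omega
  rw [hfind]
  simp only [hidx]
  simp [List.getElem?_eq_getElem hinum]
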